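-- pv_equiv track=rewrite | github.com/liamrimeiic-tech/InvestSkill | academic-research/scripts/zotero_sync.py | build_comparison_note
-- ===== SOURCE A (Python) =====
-- def build_comparison_note(current_paper, other_papers):
--     """构建跨文献对比笔记，注入本文的Zotero Notes
--
--     Args:
--         current_paper: 当前论文的paper_data
--         other_papers: 同session中其他已解析论文列表
--
--     Returns:
--         HTML格式的对比笔记字符串
--     """
--     if not other_papers:
--         return ""
--
--     current_id = current_paper.get("paper_id") or current_paper.get("doi", "")
--     current_title = current_paper.get("title", "")[:60]
--     current_year = current_paper.get("year", "")
--     current_track = current_paper.get("track", "")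
--     current_methods = current_paper.get("_parsed_methods", "")
--
--     lines = [
--         '<h2>跨文献对比</h2>',
--         '<p>本文与同课题其他文献的方法论与结论对比：</p>',
--         '<table>',
--         '<tr><th>对比维度</th><th>本文</th><th>对比文献</th></tr>',
--     ]
--
--     # 维度1: 研究方法
--     method_dim = f'<b>方法</b>: {current_methods or "见研究方法节"}'
--     for other in other_papers[:3]:
--         other_id = other.get("paper_id") or other.get("doi", "")
--         if other_id == current_id:
--             continue
--         other_title = other.get("title", "")[:50]
--         other_year = other.get("year", "")
--         other_methods = other.get("_parsed_methods", "未解析")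
--         other_track = other.get("track", "")
--         rows = [
--             ("主题", current_title[:50], f'{other_title[:50]} ({other_year})'),
--             ("轨道", current_track, other_track),
--             ("方法", current_methods or "见节", other_methods or "见节"),
--         ]
--         for dim, cur, oth in rows:
--             lines.append(f'<tr><td><b>{dim}</b></td><td>{cur}</td><td>{oth}</td></tr>')
--         break  # 仅对比最相关的1篇
--     lines.append('</table>')
--
--     lines.append('<h3>方法论差异简述</h3>')
--     for other in other_papers[:3]:
--         other_id = other.get("paper_id") or other.get("doi", "")
--         if other_id == current_id:
--             continue
--         other_title = other.get("title", "")[:50]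
--         cur_methods = current_paper.get("_parsed_methods", "未提取")
--         oth_methods = other.get("_parsed_methods", "未提取")
--         lines.append(
--             f'<p>[对比 {current_id} vs {other_id}] '
--             f'本文({cur_methods}) vs {other_title}({oth_methods})</p>'
--         )
--
--     return "\n".join(lines)
-- ===== SOURCE B (Python) =====
-- def build_comparison_note(current_paper, other_papers):
--     """Same HTML note, computed in ONE fused pass: a single loop over
--     other_papers[:3] simultaneously captures the table rows of the first
--     non-self paper and accumulates every diff paragraph, instead of the
--     original's two staged skip/continue loops (one with a break)."""
--     if not other_papers:
--         return ""
--
--     cid = current_paper.get("paper_id") or current_paper.get("doi", "")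
--     cur_title = current_paper.get("title", "")[:60]
--     cur_track = current_paper.get("track", "")
--     cur_methods = current_paper.get("_parsed_methods", "")
--     cm = current_paper.get("_parsed_methods", "未提取")
--
--     rows = None
--     diffs = []
--     for o in other_papers[:3]:
--         oid = o.get("paper_id") or o.get("doi", "")
--         if oid == cid:
--             continue
--         if rows is None:
--             rows = [
--                 '<tr><td><b>主题</b></td><td>%s</td><td>%s (%s)</td></tr>'
--                 % (cur_title[:50], o.get("title", "")[:50][:50], o.get("year", "")),
--                 '<tr><td><b>轨道</b></td><td>%s</td><td>%s</td></tr>'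
--                 % (cur_track, o.get("track", "")),
--                 '<tr><td><b>方法</b></td><td>%s</td><td>%s</td></tr>'
--                 % (cur_methods or "见节", o.get("_parsed_methods", "未解析") or "见节"),
--             ]
--         diffs.append('<p>[对比 %s vs %s] 本文(%s) vs %s(%s)</p>'
--                      % (cid, oid, cm, o.get("title", "")[:50],
--                         o.get("_parsed_methods", "未提取")))
--
--     return "\n".join(
--         ['<h2>跨文献对比</h2>',
--          '<p>本文与同课题其他文献的方法论与结论对比：</p>',
--          '<table>',
--          '<tr><th>对比维度</th><th>本文</th><th>对比文献</th></tr>']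
--         + (rows or [])
--         + ['</table>', '<h3>方法论差异简述</h3>']
--         + diffs)
-- ===== Notes on version B (the rewrite author's own statement) =====
-- stated objective: alternative
-- what changed: Replaces A's two staged skip/continue loops over other_papers[:3] (one find-first-then-break for the table rows, one for the diff paragraphs) by ONE fused pass with an accumulator that captures the first non-self paper's rows and collects all diff lines in the same traversal.
import Mathlib
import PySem

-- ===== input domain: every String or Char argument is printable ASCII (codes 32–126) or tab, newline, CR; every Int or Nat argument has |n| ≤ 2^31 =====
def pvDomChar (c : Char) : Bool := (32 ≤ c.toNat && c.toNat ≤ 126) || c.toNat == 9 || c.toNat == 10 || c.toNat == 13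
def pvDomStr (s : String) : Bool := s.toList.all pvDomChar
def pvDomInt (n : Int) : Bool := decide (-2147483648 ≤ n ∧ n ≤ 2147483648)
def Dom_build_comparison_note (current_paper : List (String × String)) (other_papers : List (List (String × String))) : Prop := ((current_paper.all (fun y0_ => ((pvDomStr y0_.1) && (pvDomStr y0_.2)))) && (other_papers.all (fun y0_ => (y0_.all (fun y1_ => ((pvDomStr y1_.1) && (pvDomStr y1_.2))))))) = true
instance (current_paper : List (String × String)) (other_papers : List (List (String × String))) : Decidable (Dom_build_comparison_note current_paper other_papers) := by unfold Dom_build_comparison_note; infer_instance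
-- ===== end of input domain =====

-- B fuses A's two staged skip/continue loops into ONE pass that simultaneously captures the first
-- non-self paper's table rows and accumulates every diff paragraph; objective: alternative decomposition.

-- shared small helpers (both Pythons compute these identically)
-- Python's `s or t` on strings
def pvOrS (a b : String) : String := if a = "" then b else a
-- d.get(k, dflt)
def pvGetS (p : List (String × String)) (k dflt : String) : String :=
  PySem.Dict.getD (PySem.Dict.mk p) k dflt
-- p.get("paper_id") or p.get("doi", "")
def pvIdOf (p : List (String × String)) : String :=
  pvOrS (pvGetS p "paper_id" "") (pvGetS p "doi" "")

def pvHeader : List String :=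
  ["<h2>跨文献对比</h2>",
   "<p>本文与同课题其他文献的方法论与结论对比：</p>",
   "<table>",
   "<tr><th>对比维度</th><th>本文</th><th>对比文献</th></tr>"]

def pvRowLine (dim cur oth : String) : String :=
  "<tr><td><b>" ++ dim ++ "</b></td><td>" ++ cur ++ "</td><td>" ++ oth ++ "</td></tr>"

-- the three table rows for a chosen other paper (identical text in A and B)
def pvRowsFor (current_title current_track current_methods : String)
    (other : List (String × String)) : List String :=
  let other_title := PySem.Str.slice (pvGetS other "title" "") none (some 50)
  let other_year := pvGetS other "year" ""
  let other_methods := pvGetS other "_parsed_methods" "未解析"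
  let other_track := pvGetS other "track" ""
  [pvRowLine "主题" (PySem.Str.slice current_title none (some 50))
      (PySem.Str.slice other_title none (some 50) ++ " (" ++ other_year ++ ")"),
   pvRowLine "轨道" current_track other_track,
   pvRowLine "方法" (pvOrS current_methods "见节") (pvOrS other_methods "见节")]

-- the '<p>[对比 …]</p>' diff paragraph (identical text in A and B)
def pvDiffLine (current_id cur_methods : String) (other : List (String × String)) : String :=
  "<p>[对比 " ++ current_id ++ " vs " ++ pvIdOf other ++ "] 本文(" ++ cur_methods ++ ") vs "
    ++ PySem.Str.slice (pvGetS other "title" "") none (some 50)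
    ++ "(" ++ pvGetS other "_parsed_methods" "未提取" ++ ")</p>"

-- ===== PORT A =====
-- A's first loop: skip matching ids, emit the three rows for the first non-match, then break
def bcnFirstLoopA (current_id current_title current_track current_methods : String) :
    List (List (String × String)) → List String
  | [] => []
  | other :: rest =>
    if pvIdOf other = current_id then
      bcnFirstLoopA current_id current_title current_track current_methods rest
    else
      pvRowsFor current_title current_track current_methods other

-- A's second loop: skip matching ids, append a diff paragraph for each remaining paper
def bcnSecondLoopA (current_id cur_methods : String) :
    List (List (String × String)) → List String
  | [] => []
  | other :: rest =>
    if pvIdOf other = current_id then bcnSecondLoopA current_id cur_methods rest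
    else pvDiffLine current_id cur_methods other :: bcnSecondLoopA current_id cur_methods rest

def build_comparison_note (current_paper : List (String × String)) (other_papers : List (List (String × String))) : String :=
  if other_papers.isEmpty then "" else
    let current_id := pvIdOf current_paper
    let current_title := PySem.Str.slice (pvGetS current_paper "title" "") none (some 60)
    let current_track := pvGetS current_paper "track" ""
    let current_methods := pvGetS current_paper "_parsed_methods" ""
    let front := PySem.List.slice other_papers none (some 3)
    let lines := pvHeader
      ++ bcnFirstLoopA current_id current_title current_track current_methods front
      ++ ["</table>", "<h3>方法论差异简述</h3>"]
      ++ bcnSecondLoopA current_id (pvGetS current_paper "_parsed_methods" "未提取") front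
    PySem.Str.join "\n" lines

-- ===== PORT B =====
-- B's single fused pass: the loop state is (rows-so-far as an Option, diff lines so far),
-- threaded forward exactly like the Python for-loop (tail recursion = the loop)
def bcnFusedB (cid ct ctr cm cm2 : String) (acc : Option (List String) × List String) :
    List (List (String × String)) → Option (List String) × List String
  | [] => acc
  | o :: rest =>
    if pvIdOf o = cid then bcnFusedB cid ct ctr cm cm2 acc rest
    else
      bcnFusedB cid ct ctr cm cm2
        ((match acc.1 with | none => some (pvRowsFor ct ctr cm o) | some r => some r),
         acc.2 ++ [pvDiffLine cid cm2 o]) rest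

def build_comparison_note_alt (current_paper : List (String × String)) (other_papers : List (List (String × String))) : String :=
  if other_papers.isEmpty then "" else
    let cid := pvIdOf current_paper
    let cur_title := PySem.Str.slice (pvGetS current_paper "title" "") none (some 60)
    let cur_track := pvGetS current_paper "track" ""
    let cur_methods := pvGetS current_paper "_parsed_methods" ""
    let cm := pvGetS current_paper "_parsed_methods" "未提取"
    let st := bcnFusedB cid cur_title cur_track cur_methods cm (none, [])
      (PySem.List.slice other_papers none (some 3))
    PySem.Str.join "\n"
      (pvHeader ++ st.1.getD [] ++ ["</table>", "<h3>方法论差异简述</h3>"] ++ st.2)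

-- ===== PRECONDITION & SPEC =====
def Spec_build_comparison_note (current_paper : List (String × String)) (other_papers : List (List (String × String))) (out : String) : Prop := out = build_comparison_note_alt current_paper other_papers
instance (current_paper : List (String × String)) (other_papers : List (List (String × String))) (out : String) : Decidable (Spec_build_comparison_note current_paper other_papers out) := by unfold Spec_build_comparison_note; infer_instance

-- ===== CLAIM (what is proved, stated in full; the proofs are below) =====
def Claim_equal_build_comparison_note : Prop := ∀ (current_paper : List (String × String)) (other_papers : List (List (String × String))), Dom_build_comparison_note current_paper other_papers → Spec_build_comparison_note current_paper other_papers (build_comparison_note current_paper other_papers)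

-- ===== LEMMAS AND PROOFS =====
theorem fused_eq_loops (cid ct ctr cm cm2 : String) (l : List (List (String × String)))
    (acc : Option (List String) × List String) :
    bcnFusedB cid ct ctr cm cm2 acc l =
      ((match acc.1 with
        | none => (match bcnFirstLoopA cid ct ctr cm l with | [] => none | r => some r)
        | some r => some r),
       acc.2 ++ bcnSecondLoopA cid cm2 l) := by
  induction l generalizing acc with
  | nil =>
    obtain ⟨r, ds⟩ := acc
    cases r <;> simp [bcnFusedB, bcnFirstLoopA, bcnSecondLoopA]
  | cons o rest ih =>
    by_cases h : pvIdOf o = cid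
    · simp [bcnFusedB, bcnFirstLoopA, bcnSecondLoopA, h, ih]
    · cases hy : acc.1 <;>
        simp [bcnFusedB, bcnFirstLoopA, bcnSecondLoopA, h, ih, hy, pvRowsFor]

-- ===== VERDICT (by name: the statement is the Claim_ definition above) =====
theorem build_comparison_note_spec : Claim_equal_build_comparison_note := by
  intro current_paper other_papers _
  unfold Spec_build_comparison_note build_comparison_note build_comparison_note_alt
  by_cases h : other_papers.isEmpty
  · simp [h]
  · simp only [h, Bool.false_eq_true, ite_false, fused_eq_loops]
    congr 1
    cases hr : bcnFirstLoopA (pvIdOf current_paper)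
        (PySem.Str.slice (pvGetS current_paper "title" "") none (some 60))
        (pvGetS current_paper "track" "") (pvGetS current_paper "_parsed_methods" "")
        (PySem.List.slice other_papers none (some 3)) <;> simp
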